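-- pv_equiv track=rewrite | github.com/alexing/paypal_mleng | paypal2.py | findMaxSubsegmentsCount
-- ===== SOURCE A (Python) =====
-- from typing import List
--
-- def findMaxSubsegmentsCount(array: List[int]) -> int:
--     n = len(array)
--
--     # create two arrays: prefix_max and suffix_min, where prefix_max[i] is the maximum value in arr[0..i]
--     # and suffix_min[i] is the minimum value in arr[i..n-1]. Initialize them in 0.
--     prefix_max = [0] * n
--     suffix_min = [0] * n
--     prefix_max[0] = array[0]
--     suffix_min[n - 1] = array[n - 1]
--
--     # compute prefix_max
--     for i in range(1, n):
--         prefix_max[i] = max(prefix_max[i - 1], array[i])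
--
--     # compute suffix_min
--     for i in range(n - 2, -1, -1):
--         suffix_min[i] = min(suffix_min[i + 1], array[i])
--
--     # count the number of valid subsegments
--     valid_subsegments = 1
--     for i in range(n - 1):
--         if prefix_max[i] <= suffix_min[i + 1]:
--             valid_subsegments += 1
--
--     return valid_subsegments
-- ===== SOURCE B (Python) =====
-- from typing import List
--
-- def findMaxSubsegmentsCount(array: List[int]) -> int:
--     # One pass with a monotonic stack of chunk maxima; the answer is the stack size.
--     stack = []
--     for num in array:
--         if stack and num < stack[-1]:
--             head = stack.pop()
--             while stack and num < stack[-1]: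
--                 stack.pop()
--             stack.append(head)
--         else:
--             stack.append(num)
--     return len(stack)
-- ===== Notes on version B (the rewrite author's own statement) =====
-- stated objective: faster
-- what changed: Replaced the three-pass prefix-max/suffix-min array scan by a single-pass monotonic stack of chunk maxima whose final length is the answer.
-- crash fix: On the empty list A raises IndexError (it writes prefix_max[0] = array[0]); B naturally returns 0, the number of chunks of an empty array. — e.g. on findMaxSubsegmentsCount([]): A raises IndexError, B returns 0
import Mathlib
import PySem

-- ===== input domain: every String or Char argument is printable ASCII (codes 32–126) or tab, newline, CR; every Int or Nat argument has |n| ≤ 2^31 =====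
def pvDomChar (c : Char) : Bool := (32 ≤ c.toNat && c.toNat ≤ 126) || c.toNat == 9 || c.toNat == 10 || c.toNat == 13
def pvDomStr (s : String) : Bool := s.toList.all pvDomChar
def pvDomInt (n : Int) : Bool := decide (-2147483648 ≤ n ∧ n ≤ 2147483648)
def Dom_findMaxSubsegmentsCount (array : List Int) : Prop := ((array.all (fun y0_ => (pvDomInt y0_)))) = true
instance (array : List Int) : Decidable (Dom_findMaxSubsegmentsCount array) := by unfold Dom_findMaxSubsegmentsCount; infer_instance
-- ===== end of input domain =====

-- B replaces A's three passes over prefix-max/suffix-min auxiliary arrays by a single monotonic-stack pass whose final stack size is the answer (objective: alternative algorithm).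
-- ===== PORT A =====
def findMaxSubsegmentsCount (array : List Int) : Int :=
  let n : Int := array.length
  let prefix_max : List Int := List.replicate array.length 0
  let suffix_min : List Int := List.replicate array.length 0
  let prefix_max := PySem.List.pySetD prefix_max 0 (PySem.List.pyGetD array 0 0)
  let suffix_min := PySem.List.pySetD suffix_min (n - 1) (PySem.List.pyGetD array (n - 1) 0)
  let prefix_max := (PySem.List.pyRange 1 n 1).foldl (fun pm i =>
      PySem.List.pySetD pm i (max (PySem.List.pyGetD pm (i - 1) 0) (PySem.List.pyGetD array i 0))) prefix_max
  let suffix_min := (PySem.List.pyRange (n - 2) (-1) (-1)).foldl (fun sm i =>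
      PySem.List.pySetD sm i (min (PySem.List.pyGetD sm (i + 1) 0) (PySem.List.pyGetD array i 0))) suffix_min
  let valid_subsegments : Int := (PySem.List.pyRange 0 (n - 1) 1).foldl (fun v i =>
      if PySem.List.pyGetD prefix_max i 0 ≤ PySem.List.pyGetD suffix_min (i + 1) 0 then v + 1 else v) 1
  valid_subsegments

-- ===== PORT B =====
-- The Python stack grows at the right end; the port keeps the top at the head of the list.
def popWhile (num : Int) : List Int → List Int
  | t :: rest => if num < t then popWhile num rest else t :: rest
  | [] => []

def stackStep (stack : List Int) (num : Int) : List Int :=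
  match stack with
  | t :: rest => if num < t then t :: popWhile num rest else num :: t :: rest
  | [] => [num]

def findMaxSubsegmentsCount_alt (array : List Int) : Int :=
  ((array.foldl stackStep []).length : Int)

-- ===== PRECONDITION & SPEC =====
-- Pre_ excludes only the empty list, on which A raises IndexError (prefix_max[0] = array[0]).
def Pre_findMaxSubsegmentsCount (array : List Int) : Prop := array ≠ []
instance (array : List Int) : Decidable (Pre_findMaxSubsegmentsCount array) := by unfold Pre_findMaxSubsegmentsCount; infer_instance
def pvWitness_findMaxSubsegmentsCount : List Int := [3, 1, 2, 4]

-- On the empty list A raises IndexError; B returns 0 (the number of chunks of an empty array).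
def Raises_findMaxSubsegmentsCount (array : List Int) : Prop := array = []
instance (array : List Int) : Decidable (Raises_findMaxSubsegmentsCount array) := by unfold Raises_findMaxSubsegmentsCount; infer_instance
def pvRaiseWitness_findMaxSubsegmentsCount : List Int := []
def pvRaiseWitnessOut_findMaxSubsegmentsCount : Int := 0

def Spec_findMaxSubsegmentsCount (array : List Int) (out : Int) : Prop := out = findMaxSubsegmentsCount_alt array
instance (array : List Int) (out : Int) : Decidable (Spec_findMaxSubsegmentsCount array out) := by unfold Spec_findMaxSubsegmentsCount; infer_instance

-- ===== CLAIM (what is proved, stated in full; the proofs are below) =====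
def Claim_equal_findMaxSubsegmentsCount : Prop := ∀ (array : List Int), Dom_findMaxSubsegmentsCount array → Pre_findMaxSubsegmentsCount array → Spec_findMaxSubsegmentsCount array (findMaxSubsegmentsCount array)
def Claim_raises_findMaxSubsegmentsCount : Prop := (∀ (array : List Int), Dom_findMaxSubsegmentsCount array → Raises_findMaxSubsegmentsCount array → ¬ Pre_findMaxSubsegmentsCount array) ∧ (Dom_findMaxSubsegmentsCount (pvRaiseWitness_findMaxSubsegmentsCount) ∧ Raises_findMaxSubsegmentsCount (pvRaiseWitness_findMaxSubsegmentsCount) ∧ findMaxSubsegmentsCount_alt (pvRaiseWitness_findMaxSubsegmentsCount) = pvRaiseWitnessOut_findMaxSubsegmentsCount)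

-- ===== LEMMAS AND PROOFS =====
-- Both programs are proved equal to 1 + |cuts p|, where cuts p is the set of valid
-- partition points i with max(p[0..i]) ≤ min(p[i+1..]).



def pM : List Int → Nat → Int
  | [], _ => 0
  | a :: t, i => (t.take i).foldl max a

def sM (p : List Int) (i : Nat) : Int :=
  match p.drop i with
  | [] => 0
  | a :: t => t.foldl min a

def cuts (p : List Int) : List Nat :=
  (List.range (p.length - 1)).filter (fun i => pM p i ≤ sM p (i + 1))

theorem foldl_max_le_init (b : Int) (l : List Int) : b ≤ l.foldl max b := by
  induction l generalizing b with
  | nil => simp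
  | cons h t ih => exact le_trans (le_max_left b h) (ih (max b h))

theorem pM_snoc (p : List Int) (x : Int) (i : Nat) (h : i < p.length) :
    pM (p ++ [x]) i = pM p i := by
  cases p with
  | nil => simp at h
  | cons a t =>
    simp only [pM, List.cons_append]
    rw [List.take_append_of_le_length (by simpa using Nat.lt_succ_iff.mp h)]

theorem pM_snoc_last (p : List Int) (x : Int) (hp : p ≠ []) :
    pM (p ++ [x]) p.length = max (pM p (p.length - 1)) x := by
  cases p with
  | nil => simp at hp
  | cons a t =>
    simp only [pM, List.cons_append, List.length_cons, Nat.add_sub_cancel]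
    rw [List.take_of_length_le (by simp), List.take_length, List.foldl_append]
    simp

theorem pM_mono (p : List Int) (i j : Nat) (hij : i ≤ j) : pM p i ≤ pM p j := by
  cases p with
  | nil => simp [pM]
  | cons a t =>
    simp only [pM]
    rw [show j = i + (j - i) by omega, List.take_add, List.foldl_append]
    exact foldl_max_le_init _ _

theorem sM_snoc (p : List Int) (x : Int) (i : Nat) (h : i < p.length) :
    sM (p ++ [x]) i = min (sM p i) x := by
  rw [sM, sM, List.drop_append_of_le_length (le_of_lt h)]
  cases hd : p.drop i with
  | nil => exact absurd (by simpa using congrArg List.length hd) (by omega)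
  | cons a t => simp [List.foldl_append]

theorem sM_snoc_last (p : List Int) (x : Int) : sM (p ++ [x]) p.length = x := by
  rw [sM, List.drop_left]
  rfl

theorem cuts_snoc (p : List Int) (x : Int) (hp : p ≠ []) :
    cuts (p ++ [x]) = (cuts p).filter (fun i => pM p i ≤ x)
      ++ (if pM p (p.length - 1) ≤ x then [p.length - 1] else []) := by
  have hlen : (p ++ [x]).length - 1 = p.length := by simp
  have hl1 : p.length = (p.length - 1) + 1 := by
    have := List.length_pos_of_ne_nil hp; omega
  rw [cuts, hlen, hl1, List.range_succ, List.filter_append]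
  congr 1
  · rw [List.filter_congr (l := List.range (p.length - 1))
      (q := fun i => decide (pM p i ≤ x) && decide (pM p i ≤ sM p (i+1)))]
    · rw [cuts, List.filter_filter]
    · intro i hi
      have hi' : i < p.length - 1 := List.mem_range.mp hi
      rw [pM_snoc p x i (by omega), sM_snoc p x (i+1) (by omega)]
      simp [and_comm]
  · rw [List.filter_singleton]
    have h1 : pM (p ++ [x]) (p.length - 1) = pM p (p.length - 1) :=
      pM_snoc p x _ (by omega)
    have h2 : sM (p ++ [x]) ((p.length - 1) + 1) = x := by
      rw [← hl1]; exact sM_snoc_last p x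
    by_cases hc : pM p (p.length - 1) ≤ x <;> simp [h1, h2, hc]

theorem popWhile_eq_dropWhile (x : Int) (l : List Int) :
    popWhile x l = l.dropWhile (fun t => decide (x < t)) := by
  induction l with
  | nil => rfl
  | cons h t ih => by_cases hc : x < h <;> simp [popWhile, List.dropWhile, hc, ih]

theorem dropWhile_reverse_sorted (m : List Int) (x : Int) (hm : m.Pairwise (· ≤ ·)) :
    m.reverse.dropWhile (fun t => decide (x < t)) = (m.filter (fun t => decide (t ≤ x))).reverse := by
  induction m using List.reverseRecOn with
  | nil => rfl
  | append_singleton m b ih =>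
    have hmb : ∀ a ∈ m, a ≤ b := by
      intro a ha
      exact (List.pairwise_append.mp hm).2.2 a ha b (by simp)
    have hm' : m.Pairwise (· ≤ ·) := (List.pairwise_append.mp hm).1
    rw [List.reverse_append, List.filter_append]
    by_cases hc : x < b
    · simp only [List.reverse_singleton, List.singleton_append, List.dropWhile_cons,
        decide_eq_true_eq, hc, if_pos trivial]
      rw [ih hm']
      simp [show ¬ b ≤ x by omega]
    · simp only [List.reverse_singleton, List.singleton_append, List.dropWhile_cons,
        decide_eq_true_eq, hc]
      rw [List.filter_eq_self.mpr (fun a ha => by simpa using le_trans (hmb a ha) (by omega)),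
        List.filter_singleton]
      simp [show b ≤ x by omega]

theorem cuts_lt (p : List Int) : ∀ i ∈ cuts p, i < p.length - 1 := by
  intro i hi
  exact List.mem_range.mp (List.mem_of_mem_filter hi)

theorem cuts_pairwise (p : List Int) : (cuts p).Pairwise (· < ·) :=
  List.Pairwise.filter _ List.pairwise_lt_range

theorem map_pM_pairwise (p : List Int) :
    ((cuts p).map (pM p)).Pairwise (· ≤ ·) :=
  List.Pairwise.map _ (fun {i j} h => pM_mono p i j (le_of_lt h)) (cuts_pairwise p)

theorem stack_inv (p : List Int) (hp : p ≠ []) :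
    p.foldl stackStep [] = (((cuts p ++ [p.length - 1]).map (pM p))).reverse := by
  induction p using List.reverseRecOn with
  | nil => exact absurd rfl hp
  | append_singleton m x ih =>
    cases hm : m with
    | nil => subst hm; rfl
    | cons a t =>
      rw [← hm]
      have hm' : m ≠ [] := by rw [hm]; simp
      have hlen : 0 < m.length := List.length_pos_of_ne_nil hm'
      rw [List.foldl_append, ih hm']
      set M := pM m (m.length - 1) with hM
      have hrev : ((cuts m ++ [m.length - 1]).map (pM m)).reverse
          = M :: ((cuts m).map (pM m)).reverse := by
        simp [hM]
      rw [List.foldl_cons, List.foldl_nil, hrev]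
      have hlen2 : (m ++ [x]).length - 1 = m.length := by simp
      have hmapc : ∀ (l : List Nat), (∀ i ∈ l, i < m.length) →
          l.map (pM (m ++ [x])) = l.map (pM m) := by
        intro l hl
        exact List.map_congr_left (fun i hi => pM_snoc m x i (hl i hi))
      by_cases hc : x < M
      · have hcut : cuts (m ++ [x]) = (cuts m).filter (fun i => pM m i ≤ x) := by
          rw [cuts_snoc m x hm', if_neg (by omega), List.append_nil]
        rw [stackStep, if_pos hc, popWhile_eq_dropWhile,
          dropWhile_reverse_sorted _ _ (map_pM_pairwise m), hcut, hlen2,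
          List.map_append, hmapc _ (fun i hi => by
            have := cuts_lt m i (List.mem_of_mem_filter hi); omega),
          List.map_singleton, pM_snoc_last m x hm', ← hM, max_eq_left (le_of_lt hc),
          List.reverse_append, List.reverse_singleton, List.singleton_append,
          List.filter_map]
        rfl
      · have hcut : cuts (m ++ [x]) = cuts m ++ [m.length - 1] := by
          rw [cuts_snoc m x hm', if_pos (by omega),
            List.filter_eq_self.mpr (fun i hi => by
              have h1 := cuts_lt m i hi
              have h2 := pM_mono m i (m.length - 1) (by omega)
              simp only [decide_eq_true_eq]; omega)]
        rw [stackStep, if_neg hc, hcut, hlen2, List.map_append,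
          hmapc _ (fun i hi => by
            rcases List.mem_append.mp hi with h | h
            · have := cuts_lt m i h; omega
            · simp at h; omega),
          List.map_singleton, pM_snoc_last m x hm', ← hM, max_eq_right (by omega),
          List.reverse_append, List.reverse_singleton, List.singleton_append, hrev]

-- step characterizations
theorem pM_succ (p : List Int) (k : Nat) (h1 : 1 ≤ k) (h2 : k < p.length) :
    pM p k = max (pM p (k - 1)) (p.getD k 0) := by
  cases p with
  | nil => simp at h2
  | cons a t =>
    simp only [pM]
    have hk : k - 1 < t.length := by simp at h2; omega
    rw [show k = (k-1) + 1 by omega, List.take_add_one, List.getElem?_eq_getElem hk]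
    simp only [Option.toList_some, List.foldl_append, List.foldl_cons, List.foldl_nil]
    have : (a :: t).getD ((k-1)+1) 0 = t[k-1] := by
      simp [List.getD, List.getElem?_eq_getElem hk]
    rw [show k - 1 + 1 - 1 = k - 1 by omega, this]

theorem foldl_min_min (l : List Int) (a b : Int) :
    l.foldl min (min a b) = min a (l.foldl min b) := by
  induction l generalizing b with
  | nil => simp
  | cons h t ih => simp only [List.foldl_cons, min_assoc, ih]

theorem sM_succ (p : List Int) (j : Nat) (h : j + 1 < p.length) :
    sM p j = min (sM p (j + 1)) (p.getD j 0) := by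
  have hj : j < p.length := by omega
  have hdrop : p.drop j = p[j] :: p.drop (j + 1) := List.drop_eq_getElem_cons hj
  rw [sM, hdrop]
  have h2 : j + 1 < p.length := h
  cases hd : p.drop (j + 1) with
  | nil => exact absurd (by simpa using congrArg List.length hd) (by omega)
  | cons b t =>
    rw [sM, hd]
    simp only [List.foldl_cons]
    rw [foldl_min_min t (p[j]) b, min_comm]
    simp [List.getD, List.getElem?_eq_getElem hj]
theorem getD_set_eq (l : List Int) (k : Nat) (v : Int) (hk : k < l.length) (i : Nat) :
    (l.set k v).getD i 0 = if i = k then v else l.getD i 0 := by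
  by_cases h : i = k
  · subst h
    simp [List.getD, hk]
  · simp [List.getD, Ne.symm h]
    exact fun hik => absurd hik h

def pmFold (p : List Int) (k : Nat) : List Int :=
  (PySem.List.pyRange 1 (k : Int) 1).foldl (fun pm i =>
      PySem.List.pySetD pm i (max (PySem.List.pyGetD pm (i - 1) 0) (PySem.List.pyGetD p i 0)))
    (PySem.List.pySetD (List.replicate p.length 0) 0 (PySem.List.pyGetD p 0 0))

theorem pmFold_spec (p : List Int) (hp : p ≠ []) (k : Nat) (hk : k ≤ p.length) :
    (pmFold p k).length = p.length ∧ ∀ i : Nat, i < k → (pmFold p k).getD i 0 = pM p i := by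
  have hlen : 0 < p.length := List.length_pos_of_ne_nil hp
  induction k with
  | zero =>
    constructor
    · simp [pmFold, PySem.List.pyRange_one_eq_nil (by norm_num : (0:Int) ≤ 1)]
    · intro i hi
      exact absurd hi (Nat.not_lt_zero i)
  | succ k ih =>
    by_cases hk0 : k = 0
    · subst hk0
      have hr : PySem.List.pyRange 1 ((1:Nat) : Int) 1 = [] :=
        PySem.List.pyRange_one_eq_nil (by norm_num)
      constructor
      · simp [pmFold]
      · intro i hi
        have hi0 : i = 0 := by omega
        subst hi0
        simp only [pmFold, hr, List.foldl_nil]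
        rw [PySem.List.pySetD_of_nonneg _ _ le_rfl]
        rw [getD_set_eq _ _ _ (by simpa using hlen)]
        cases p with
        | nil => simp at hp
        | cons a t => simp [pM, PySem.List.pyGetD_zero]
    · have hk1 : 1 ≤ k := by omega
      obtain ⟨ihL, ihG⟩ := ih (by omega)
      have hsplit : PySem.List.pyRange 1 ((k+1 : Nat) : Int) 1
          = PySem.List.pyRange 1 (k : Int) 1 ++ [(k : Int)] := by
        rw [show (((k+1 : Nat)) : Int) = (k : Int) + 1 by push_cast; ring]
        exact PySem.List.pyRange_one_succ_right (by exact_mod_cast hk1)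
      have hstep : pmFold p (k+1)
          = PySem.List.pySetD (pmFold p k) (k : Int)
              (max (PySem.List.pyGetD (pmFold p k) ((k : Int) - 1) 0)
                   (PySem.List.pyGetD p (k : Int) 0)) := by
        rw [pmFold, hsplit, List.foldl_append]
        rfl
      have hval : max (PySem.List.pyGetD (pmFold p k) ((k : Int) - 1) 0)
                   (PySem.List.pyGetD p (k : Int) 0) = pM p k := by
        rw [show ((k : Int) - 1) = ((k - 1 : Nat) : Int) by omega,
          PySem.List.pyGetD_natCast, PySem.List.pyGetD_natCast,
          ihG (k-1) (by omega), ← pM_succ p k hk1 (by omega)]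
      rw [hstep, hval, PySem.List.pySetD_natCast]
      constructor
      · simp [ihL]
      · intro i hi
        rw [getD_set_eq _ _ _ (by omega)]
        by_cases hik : i = k
        · simp [hik]
        · rw [if_neg hik, ihG i (by omega)]
theorem sM_last (p : List Int) (hp : p ≠ []) :
    sM p (p.length - 1) = p.getD (p.length - 1) 0 := by
  have hlen : 0 < p.length := List.length_pos_of_ne_nil hp
  have hj : p.length - 1 < p.length := by omega
  rw [sM, List.drop_eq_getElem_cons hj,
    show p.length - 1 + 1 = p.length by omega, List.drop_length]
  simp [List.getD, List.getElem?_eq_getElem hj]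

theorem pyRange_neg_one_append (a b : Int) (hb : b ≤ a) :
    PySem.List.pyRange a (b - 1) (-1) = PySem.List.pyRange a b (-1) ++ [b] := by
  rw [PySem.List.pyRange_neg_one, PySem.List.pyRange_neg_one,
    show (a - (b - 1)).toNat = (a - b).toNat + 1 by omega, List.range_succ, List.map_append]
  congr 1
  simp only [List.map_cons, List.map_nil]
  congr 1
  omega

def smFold (p : List Int) (j : Nat) : List Int :=
  (PySem.List.pyRange ((p.length : Int) - 2) ((j : Int) - 1) (-1)).foldl (fun sm i =>
      PySem.List.pySetD sm i (min (PySem.List.pyGetD sm (i + 1) 0) (PySem.List.pyGetD p i 0)))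
    (PySem.List.pySetD (List.replicate p.length 0) ((p.length : Int) - 1)
      (PySem.List.pyGetD p ((p.length : Int) - 1) 0))

theorem smFold_spec (p : List Int) (hp : p ≠ []) (t : Nat) (ht : t ≤ p.length - 1) :
    (smFold p (p.length - 1 - t)).length = p.length ∧
      ∀ i : Nat, p.length - 1 - t ≤ i → i ≤ p.length - 1 →
        (smFold p (p.length - 1 - t)).getD i 0 = sM p i := by
  have hlen : 0 < p.length := List.length_pos_of_ne_nil hp
  have hinit : PySem.List.pySetD (List.replicate p.length (0:Int)) ((p.length : Int) - 1)
      (PySem.List.pyGetD p ((p.length : Int) - 1) 0)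
      = (List.replicate p.length (0:Int)).set (p.length - 1) (p.getD (p.length - 1) 0) := by
    rw [show ((p.length : Int) - 1) = ((p.length - 1 : Nat) : Int) by omega,
      PySem.List.pySetD_natCast, PySem.List.pyGetD_natCast]
  induction t with
  | zero =>
    simp only [Nat.sub_zero]
    have hr : PySem.List.pyRange ((p.length : Int) - 2) (((p.length - 1 : Nat) : Int) - 1) (-1) = [] := by
      apply PySem.List.pyRange_neg_one_eq_nil
      omega
    constructor
    · simp [smFold, hr, hinit]
    · intro i h1 h2
      have hi : i = p.length - 1 := by omega
      subst hi
      rw [smFold, hr, List.foldl_nil, hinit, getD_set_eq _ _ _ (by simpa using by omega)]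
      rw [if_pos rfl, sM_last p hp]
  | succ t ih =>
    have ht' : t ≤ p.length - 1 := by omega
    obtain ⟨ihL, ihG⟩ := ih ht'
    set j := p.length - 1 - (t + 1) with hj
    have hjt : p.length - 1 - t = j + 1 := by omega
    have hsplit : PySem.List.pyRange ((p.length : Int) - 2) ((j : Int) - 1) (-1)
        = PySem.List.pyRange ((p.length : Int) - 2) (((j + 1 : Nat) : Int) - 1) (-1) ++ [(j : Int)] := by
      rw [show (((j + 1 : Nat)) : Int) - 1 = (j : Int) by push_cast; ring]
      exact pyRange_neg_one_append _ _ (by omega)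
    have hstep : smFold p j
        = PySem.List.pySetD (smFold p (j + 1)) (j : Int)
            (min (PySem.List.pyGetD (smFold p (j + 1)) ((j : Int) + 1) 0)
                 (PySem.List.pyGetD p (j : Int) 0)) := by
      rw [smFold, hsplit, List.foldl_append]
      rfl
    rw [hjt] at ihL ihG
    have hval : min (PySem.List.pyGetD (smFold p (j + 1)) ((j : Int) + 1) 0)
                 (PySem.List.pyGetD p (j : Int) 0) = sM p j := by
      rw [show ((j : Int) + 1) = ((j + 1 : Nat) : Int) by push_cast; ring,
        PySem.List.pyGetD_natCast, PySem.List.pyGetD_natCast,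
        ihG (j + 1) (by omega) (by omega), ← sM_succ p j (by omega)]
    rw [hstep, hval, PySem.List.pySetD_natCast]
    constructor
    · simp [ihL]
    · intro i h1 h2
      rw [getD_set_eq _ _ _ (by omega)]
      by_cases hij : i = j
      · simp [hij]
      · rw [if_neg hij, ihG i (by omega) h2]
theorem foldl_count (P : Int → Prop) [DecidablePred P] (l : List Int) (c : Int) :
    l.foldl (fun v i => if P i then v + 1 else v) c
      = c + (l.countP (fun i => decide (P i)) : Int) := by
  induction l generalizing c with
  | nil => simp
  | cons h t ih =>
    simp only [List.foldl_cons, List.countP_cons, ih]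
    by_cases hP : P h <;> simp [hP] <;> ring

theorem A_counts_aux (p : List Int) (hp : p ≠ []) :
    findMaxSubsegmentsCount p = 1 + ((cuts p).length : Int) := by
  have hlen : 0 < p.length := List.length_pos_of_ne_nil hp
  obtain ⟨hPL, hPG⟩ := pmFold_spec p hp p.length le_rfl
  obtain ⟨hSL, hSG⟩ := smFold_spec p hp (p.length - 1) le_rfl
  rw [show p.length - 1 - (p.length - 1) = 0 by omega] at hSL hSG
  simp only [findMaxSubsegmentsCount]
  have hPM : (PySem.List.pyRange 1 ((p.length : Int)) 1).foldl (fun pm i =>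
      PySem.List.pySetD pm i (max (PySem.List.pyGetD pm (i - 1) 0) (PySem.List.pyGetD p i 0)))
      (PySem.List.pySetD (List.replicate p.length 0) 0 (PySem.List.pyGetD p 0 0))
      = pmFold p p.length := rfl
  have hSM : (PySem.List.pyRange ((p.length : Int) - 2) (-1) (-1)).foldl (fun sm i =>
      PySem.List.pySetD sm i (min (PySem.List.pyGetD sm (i + 1) 0) (PySem.List.pyGetD p i 0)))
      (PySem.List.pySetD (List.replicate p.length 0) ((p.length : Int) - 1)
        (PySem.List.pyGetD p ((p.length : Int) - 1) 0))
      = smFold p 0 := by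
    rw [smFold]
    norm_num
  rw [hPM, hSM, foldl_count]
  congr 1
  rw [PySem.List.pyRange_one]
  rw [List.countP_map]
  rw [show (((p.length : Int) - 1 - 0)).toNat = p.length - 1 by omega]
  rw [cuts, ← List.countP_eq_length_filter]
  congr 1
  apply List.countP_congr
  intro k hk
  have hk' : k < p.length - 1 := List.mem_range.mp hk
  simp only [Function.comp_apply, zero_add]
  rw [show ((k : Int) + 1) = ((k + 1 : Nat) : Int) by push_cast; ring,
    PySem.List.pyGetD_natCast, PySem.List.pyGetD_natCast,
    hPG k (by omega), hSG (k + 1) (by omega) (by omega)]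

theorem B_counts_aux (p : List Int) (hp : p ≠ []) :
    ((p.foldl stackStep []).length : Int) = 1 + ((cuts p).length : Int) := by
  rw [stack_inv p hp]
  simp only [List.length_reverse, List.length_map, List.length_append, List.length_cons,
    List.length_nil]
  push_cast
  ring

theorem A_counts (p : List Int) (hp : p ≠ []) :
    findMaxSubsegmentsCount p = 1 + ((cuts p).length : Int) := A_counts_aux p hp

theorem B_counts (p : List Int) (hp : p ≠ []) :
    findMaxSubsegmentsCount_alt p = 1 + ((cuts p).length : Int) := by
  rw [findMaxSubsegmentsCount_alt]
  exact B_counts_aux p hp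

-- ===== VERDICT (by name: the statement is the Claim_ definition above) =====
theorem findMaxSubsegmentsCount_spec : Claim_equal_findMaxSubsegmentsCount := by
  intro array _ hpre
  unfold Spec_findMaxSubsegmentsCount
  rw [A_counts array hpre, B_counts array hpre]

theorem findMaxSubsegmentsCount_raises : Claim_raises_findMaxSubsegmentsCount := by
  unfold Claim_raises_findMaxSubsegmentsCount
  exact ⟨fun a _ hr => by
    simp [Raises_findMaxSubsegmentsCount] at hr
    simp [Pre_findMaxSubsegmentsCount, hr], by decide⟩

-- witness self-check: B's port really returns the stated value on the raise witness
theorem pvRaiseWitness_ok :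
    findMaxSubsegmentsCount_alt pvRaiseWitness_findMaxSubsegmentsCount
      = pvRaiseWitnessOut_findMaxSubsegmentsCount :=
  findMaxSubsegmentsCount_raises.2.2.2
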